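-- pv_equiv track=rewrite | github.com/ShawBool/Scheduler_demo512 | src/scheduler/thermal_model.py | max_continuous_warning_steps
-- ===== SOURCE A (Python) =====
-- def max_continuous_warning_steps(flags: list[int]) -> int:
--     max_len = 0
--     current = 0
--     for flag in flags:
--         if int(flag) == 1:
--             current += 1
--             if current > max_len:
--                 max_len = current
--         else:
--             current = 0
--     return max_len
-- ===== SOURCE B (Python) =====
-- def max_continuous_warning_steps(flags: list[int]) -> int:
--     # group-then-reduce: collect the lengths of maximal runs of 1-flags, then take the max
--     runs = []
--     i = 0
--     n = len(flags)
--     while i < n: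
--         if int(flags[i]) == 1:
--             j = i
--             while j < n and int(flags[j]) == 1:
--                 j += 1
--             runs.append(j - i)
--             i = j
--         else:
--             i += 1
--     return max(runs, default=0)
-- ===== Notes on version B (the rewrite author's own statement) =====
-- stated objective: alternative
-- what changed: Replaces the running-counter-with-reset single state machine by a group-then-reduce shape: first scan out the lengths of all maximal runs of 1-flags into a list, then reduce with max (default 0).
import Mathlib
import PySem

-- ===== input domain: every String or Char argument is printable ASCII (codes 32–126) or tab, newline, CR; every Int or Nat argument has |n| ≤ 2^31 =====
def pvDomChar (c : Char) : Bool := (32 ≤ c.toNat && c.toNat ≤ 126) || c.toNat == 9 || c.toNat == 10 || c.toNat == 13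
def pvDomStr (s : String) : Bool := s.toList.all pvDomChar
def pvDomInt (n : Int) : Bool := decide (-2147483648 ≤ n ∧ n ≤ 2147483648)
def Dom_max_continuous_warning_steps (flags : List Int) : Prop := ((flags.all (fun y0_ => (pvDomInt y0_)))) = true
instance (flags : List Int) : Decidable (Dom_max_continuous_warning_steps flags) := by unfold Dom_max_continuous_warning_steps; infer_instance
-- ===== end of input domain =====

-- B replaces A's running-counter-with-reset loop by group-then-reduce: collect maximal 1-run lengths, then max (alternative decomposition, same O(n) cost).

-- ===== PORT A =====
-- loop body of A; state = (max_len, current); int(flag) is the identity on Int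
def pvStepA (s : Int × Int) (flag : Int) : Int × Int :=
  if flag = 1 then
    let current := s.2 + 1
    let maxLen := if current > s.1 then current else s.1
    (maxLen, current)
  else (s.1, 0)

def max_continuous_warning_steps (flags : List Int) : Int :=
  (flags.foldl pvStepA (0, 0)).1

-- ===== PORT B =====
-- B's inner while loop scanning the run of 1s = the takeWhile/dropWhile split
def pvRuns (flags : List Int) : List Nat :=
  match flags with
  | [] => []
  | x :: xs =>
    if x = 1 then
      ((xs.takeWhile (· == 1)).length + 1) :: pvRuns (xs.dropWhile (· == 1))
    else pvRuns xs
termination_by flags.length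
decreasing_by
  · have := List.length_dropWhile_le (p := (· == (1:Int))) xs
    simp; omega
  · simp

-- max(runs, default=0)
def max_continuous_warning_steps_alt (flags : List Int) : Int :=
  (pvRuns flags).foldl (fun (m : Int) (n : Nat) => max m (n : Int)) 0

-- ===== PRECONDITION & SPEC =====
def Spec_max_continuous_warning_steps (flags : List Int) (out : Int) : Prop := out = max_continuous_warning_steps_alt flags
instance (flags : List Int) (out : Int) : Decidable (Spec_max_continuous_warning_steps flags out) := by unfold Spec_max_continuous_warning_steps; infer_instance

-- ===== CLAIM (what is proved, stated in full; the proofs are below) =====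
def Claim_equal_max_continuous_warning_steps : Prop := ∀ (flags : List Int), Dom_max_continuous_warning_steps flags → Spec_max_continuous_warning_steps flags (max_continuous_warning_steps flags)

-- ===== LEMMAS AND PROOFS =====

-- the largest value A's max_len update ever sees, running on l with current run length c
def pvBest (c : Int) : List Int → Int
  | [] => 0
  | x :: xs => if x = 1 then max (c + 1) (pvBest (c + 1) xs) else pvBest 0 xs

theorem pvBest_nonneg (l : List Int) : ∀ c, 0 ≤ pvBest c l := by
  induction l with
  | nil => intro c; simp [pvBest]
  | cons x xs ih =>
    intro c
    by_cases h : x = 1 <;> simp [pvBest, h]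
    · exact Or.inr (ih (c + 1))
    · exact ih 0

theorem pvA_fold (l : List Int) : ∀ (m c : Int), 0 ≤ m →
    (l.foldl pvStepA (m, c)).1 = max m (pvBest c l) := by
  induction l with
  | nil => intro m c hm; simp only [List.foldl_nil, pvBest]; omega
  | cons x xs ih =>
    intro m c hm
    rw [List.foldl_cons]
    by_cases h : x = 1
    · have hs : pvStepA (m, c) x = (max m (c + 1), c + 1) := by
        simp only [pvStepA, if_pos h, Prod.mk.injEq]
        exact ⟨by omega, by trivial⟩
      rw [hs, ih _ _ (by omega)]
      simp only [pvBest, if_pos h]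
      omega
    · have hs : pvStepA (m, c) x = (m, 0) := by simp [pvStepA, h]
      rw [hs, ih _ _ hm]
      simp only [pvBest, if_neg h]

theorem pvFold_max_init (l : List Nat) : ∀ (a : Int), 0 ≤ a →
    l.foldl (fun (m : Int) (n : Nat) => max m (n : Int)) a
      = max a (l.foldl (fun (m : Int) (n : Nat) => max m (n : Int)) 0) := by
  induction l with
  | nil => intro a ha; simp only [List.foldl_nil]; omega
  | cons x xs ih =>
    intro a ha
    have hx : (0:Int) ≤ (x:Int) := Int.natCast_nonneg x
    simp only [List.foldl_cons]
    rw [ih (max a x) (by omega), ih (max 0 x) (by omega)]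
    omega

theorem pvBest_ones (p : List Int) : ∀ (c : Int) (r : List Int), 0 ≤ c →
    (∀ x ∈ p, x = 1) → (∀ y, r.head? = some y → ¬ y = 1) →
    max c (pvBest c (p ++ r)) = max (c + p.length) (pvBest 0 r) := by
  induction p with
  | nil =>
    intro c r hc _ hr
    cases r with
    | nil => simp [pvBest]
    | cons y ys =>
      have hy : ¬ y = 1 := hr y rfl
      simp [pvBest, hy]
  | cons a p' ih =>
    intro c r hc hp hr
    have ha : a = 1 := hp a (by simp)
    subst ha
    simp only [List.cons_append, pvBest]
    rw [ih (c + 1) r (by omega) (fun x hx => hp x (by simp [hx])) hr]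
    have := pvBest_nonneg r 0
    simp only [List.length_cons]
    push_cast
    omega

theorem pvBest_eq_runs (l : List Int) : pvBest 0 l = max_continuous_warning_steps_alt l := by
  induction hn : l.length using Nat.strong_induction_on generalizing l with
  | _ n ih =>
  cases l with
  | nil => simp [pvBest, max_continuous_warning_steps_alt, pvRuns]
  | cons x xs =>
    by_cases h : x = 1
    · subst h
      have hsplit : xs.takeWhile (· == (1:Int)) ++ xs.dropWhile (· == (1:Int)) = xs :=
        List.takeWhile_append_dropWhile
      have hmem : ∀ y ∈ xs.takeWhile (· == (1:Int)), y = 1 := by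
        intro y hy
        have := List.mem_takeWhile_imp hy
        simpa using this
      have hhead : ∀ y, (xs.dropWhile (· == (1:Int))).head? = some y → ¬ y = 1 := by
        intro y hy
        have hne : xs.dropWhile (· == (1:Int)) ≠ [] := by
          intro h0; rw [h0] at hy; simp at hy
        have hh := List.head_dropWhile_not (p := (· == (1:Int))) (l := xs) hne
        rw [List.head?_eq_some_head hne] at hy
        simp_all
      have hlen : (xs.dropWhile (· == (1:Int))).length < n := by
        have := List.length_dropWhile_le (p := (· == (1:Int))) xs
        simp at hn; omega
      have hmain : pvBest 0 (1 :: xs) = max (((xs.takeWhile (· == (1:Int))).length : Int) + 1)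
          (pvBest 0 (xs.dropWhile (· == (1:Int)))) := by
        have h1 : pvBest 0 ((1:Int) :: xs) = max 1 (pvBest 1 xs) := by
          simp [pvBest]
        have h3 : max (1:Int) (pvBest 1 xs)
            = max (1 + ((xs.takeWhile (· == (1:Int))).length : Int))
                (pvBest 0 (xs.dropWhile (· == (1:Int)))) := by
          conv_lhs => rw [← hsplit]
          exact pvBest_ones _ 1 _ (by omega) hmem hhead
        rw [h1, h3]
        omega
      rw [hmain]
      unfold max_continuous_warning_steps_alt
      rw [pvRuns]
      rw [if_pos (show (1:Int) = 1 from rfl), List.foldl_cons]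
      have hinit : max (0:Int) (((xs.takeWhile (· == (1:Int))).length + 1 : Nat) : Int)
          = (((xs.takeWhile (· == (1:Int))).length + 1 : Nat) : Int) := by omega
      rw [hinit, pvFold_max_init _ _ (by omega)]
      rw [ih _ hlen _ rfl]
      unfold max_continuous_warning_steps_alt
      push_cast
      omega
    · have hxs : xs.length < n := by simp at hn; omega
      have hskip : pvBest 0 (x :: xs) = pvBest 0 xs := by simp [pvBest, h]
      rw [hskip, ih _ hxs _ rfl]
      unfold max_continuous_warning_steps_alt
      rw [pvRuns]
      simp [h]

-- ===== VERDICT (by name: the statement is the Claim_ definition above) =====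
theorem max_continuous_warning_steps_spec : Claim_equal_max_continuous_warning_steps := by
  intro flags _
  unfold Spec_max_continuous_warning_steps max_continuous_warning_steps
  rw [pvA_fold flags 0 0 le_rfl, ← pvBest_eq_runs]
  have := pvBest_nonneg flags 0
  omega
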